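-- pv_equiv track=rewrite | github.com/pypi-data/pypi-mirror-370 | packages/textfsm-jinja/textfsm_jinja-0.1.0-py3-none-any.whl/textfsm_jinja/renderer.py | _parse_output_template
-- ===== SOURCE A (Python) =====
-- from typing import Dict, Any, List, Callable, Optional
--
-- def _parse_output_template(output_template: str) -> Dict[str, str]:
--     """
--     解析输出模板定义
--
--     Args:
--         output_template (str): 输出模板定义
--
--     Returns:
--         dict: 字段到模板的映射
--     """
--     field_templates = {}
--     current_field = None
--     current_template = []
--
--     for line in output_template.splitlines():
--         if '=>' in line:
--             # 保存前一个字段的模板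
--             if current_field is not None:
--                 field_templates[current_field] = '\n'.join(current_template).strip()
--
--             # 开始新的字段
--             parts = line.split('=>', 1)
--             current_field = parts[0].strip()
--             current_template = [parts[1].strip()] if len(parts) > 1 else []
--         elif current_field is not None:
--             # 继续当前字段的模板
--             current_template.append(line)
--
--     # 保存最后一个字段的模板
--     if current_field is not None:
--         field_templates[current_field] = '\n'.join(current_template).strip()
--
--     return field_templates
-- ===== SOURCE B (Python) =====
-- def _parse_output_template(output_template: str) -> dict:
--     """Block-at-a-time re-implementation: instead of a single pass carrying
--     (current_field, current_template) state, repeatedly cut the next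
--     '=>'-headed block out of the remaining lines and emit it directly."""
--     out = {}
--     lines = output_template.splitlines()
--     while lines:
--         line, lines = lines[0], lines[1:]
--         if '=>' in line:
--             head, first = line.split('=>', 1)
--             k = 0
--             while k < len(lines) and '=>' not in lines[k]:
--                 k += 1
--             out[head.strip()] = '\n'.join([first.strip()] + lines[:k]).strip()
--             lines = lines[k:]
--     return out
-- ===== Notes on version B (the rewrite author's own statement) =====
-- stated objective: alternative
-- what changed: Replaces A's single pass carrying (current_field, current_template) mutable state with a block-cutting scan that repeatedly slices the next '=>'-headed block out of the remaining lines and emits its entry immediately.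
import Mathlib
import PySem

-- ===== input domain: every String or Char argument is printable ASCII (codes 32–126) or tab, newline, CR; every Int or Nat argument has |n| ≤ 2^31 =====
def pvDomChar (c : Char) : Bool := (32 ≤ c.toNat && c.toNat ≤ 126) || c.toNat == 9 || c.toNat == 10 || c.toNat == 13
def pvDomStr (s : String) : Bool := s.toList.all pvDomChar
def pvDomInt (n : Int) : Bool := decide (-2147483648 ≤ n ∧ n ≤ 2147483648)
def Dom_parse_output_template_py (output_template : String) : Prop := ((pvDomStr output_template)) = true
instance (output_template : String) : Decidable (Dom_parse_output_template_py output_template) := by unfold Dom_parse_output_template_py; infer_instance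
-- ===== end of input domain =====

-- B is an alternative decomposition (block-cutting scan instead of a one-pass fold carrying field state); same cost, no speed claim.

-- ===== PORT A =====
-- '=>' in line
def hasArrow (line : List Char) : Bool := PySem.Chars.isIn ['=', '>'] line

-- line.split('=>', 1) on a line that contains '=>' (so the result has two parts):
-- exact, since then split(sep, 1) = [s[:i], s[i+2:]] with i = s.find(sep) ≥ 0
def splitArrow (line : List Char) : List Char × List Char :=
  let i := (PySem.Chars.find line ['=', '>']).toNat
  (line.take i, line.drop (i + 2))

-- field_templates[field] = '\n'.join(tmpl).strip()  (shared by both Pythons verbatim)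
def flushField (d : PySem.Dict String String) (f : List Char) (tmpl : List (List Char)) :
    PySem.Dict String String :=
  d.insert (String.ofList f) (String.ofList (PySem.Chars.strip (PySem.Chars.join ['\n'] tmpl)))

-- one iteration of A's for-loop over (field_templates, current_field, current_template)
def stepA (st : PySem.Dict String String × Option (List Char) × List (List Char))
    (line : List Char) : PySem.Dict String String × Option (List Char) × List (List Char) :=
  if hasArrow line then
    let d := match st.2.1 with
      | some f => flushField st.1 f st.2.2
      | none => st.1
    let p := splitArrow line
    (d, some (PySem.Chars.strip p.1), [PySem.Chars.strip p.2])
  else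
    match st.2.1 with
    | some f => (st.1, some f, st.2.2 ++ [line])
    | none => st

-- the final 'if current_field is not None: …' flush
def finishA (st : PySem.Dict String String × Option (List Char) × List (List Char)) :
    PySem.Dict String String :=
  match st.2.1 with
  | some f => flushField st.1 f st.2.2
  | none => st.1

def parse_output_template_py (output_template : String) : List (String × String) :=
  (finishA (((PySem.Str.splitlines output_template).map String.toList).foldl stepA
    (PySem.Dict.empty, none, []))).items

-- ===== PORT B =====
-- B's while-loop: pop the head line; if it is a '=>' header, cut the run of
-- non-header lines after it (the inner 'while k < len(lines) …' = takeWhile/dropWhile)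
-- and emit the block's entry at once.
def goB (d : PySem.Dict String String) (lines : List (List Char)) : PySem.Dict String String :=
  match lines with
  | [] => d
  | line :: rest =>
    if hasArrow line then
      let p := splitArrow line
      goB (flushField d (PySem.Chars.strip p.1)
            (PySem.Chars.strip p.2 :: rest.takeWhile (fun x => !hasArrow x)))
          (rest.dropWhile (fun x => !hasArrow x))
    else goB d rest
termination_by lines.length
decreasing_by
  · have := List.length_dropWhile_le (p := fun x => !hasArrow x) (l := rest); simp; omega
  · simp

def parse_output_template_py_alt (output_template : String) : List (String × String) :=
  (goB PySem.Dict.empty ((PySem.Str.splitlines output_template).map String.toList)).items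

-- ===== PRECONDITION & SPEC =====
def Spec_parse_output_template_py (output_template : String) (out : List (String × String)) : Prop := out = parse_output_template_py_alt output_template
instance (output_template : String) (out : List (String × String)) : Decidable (Spec_parse_output_template_py output_template out) := by unfold Spec_parse_output_template_py; infer_instance

-- ===== CLAIM (what is proved, stated in full; the proofs are below) =====
def Claim_equal_parse_output_template_py : Prop := ∀ (output_template : String), Dom_parse_output_template_py output_template → Spec_parse_output_template_py output_template (parse_output_template_py output_template)

-- ===== LEMMAS AND PROOFS =====

-- with an open field, the rest of A's fold flushes the field extended by the next
-- non-header run, then proceeds like B on the remaining lines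
theorem foldA_some (lines : List (List Char)) (d : PySem.Dict String String)
    (f : List Char) (tmpl : List (List Char)) :
    finishA (lines.foldl stepA (d, some f, tmpl)) =
      goB (flushField d f (tmpl ++ lines.takeWhile (fun x => !hasArrow x)))
          (lines.dropWhile (fun x => !hasArrow x)) := by
  induction lines generalizing d f tmpl with
  | nil => simp [finishA, goB]
  | cons l ls ih =>
    by_cases h : hasArrow l = true
    · simp only [List.foldl_cons, stepA, h, if_pos, List.takeWhile_cons, List.dropWhile_cons,
        Bool.not_eq_true', h, Bool.false_eq_true, if_false]
      rw [ih]
      simp [goB, h]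
    · simp only [Bool.not_eq_true] at h
      simp only [List.foldl_cons, stepA, h, Bool.false_eq_true, if_false,
        List.takeWhile_cons, List.dropWhile_cons, Bool.not_false, if_true]
      rw [ih]
      simp

-- before the first header line A accumulates nothing, like B's skip branch
theorem foldA_none (lines : List (List Char)) (d : PySem.Dict String String)
    (tmpl : List (List Char)) :
    finishA (lines.foldl stepA (d, none, tmpl)) = goB d lines := by
  induction lines generalizing d tmpl with
  | nil => simp [finishA, goB]
  | cons l ls ih =>
    by_cases h : hasArrow l = true
    · simp only [List.foldl_cons, stepA, h, if_pos]
      rw [foldA_some]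
      simp [goB, h]
    · simp only [Bool.not_eq_true] at h
      simp only [List.foldl_cons, stepA, h, Bool.false_eq_true, if_false]
      rw [ih]
      simp [goB, h]

-- ===== VERDICT (by name: the statement is the Claim_ definition above) =====
theorem parse_output_template_py_spec : Claim_equal_parse_output_template_py := by
  intro s _
  unfold Spec_parse_output_template_py parse_output_template_py parse_output_template_py_alt
  rw [foldA_none]
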